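-- pv_equiv track=rewrite | github.com/isneace/advent-of-code-2024 | 2024/day_2/part_1.py | isSafeReportRecursive
-- ===== SOURCE A (Python) =====
-- def isValidDifference(a, b):
--   difference = abs(a - b)
--   return difference > 0 and difference <= 3
--
-- def isSafeReportRecursive(report, action = ''):
--   if(len(report) == 1):
--     return True
--
--   elif(not isValidDifference(report[0], report[1])):
--     return False
--
--   elif(report[0] < report[1] and (not action or action == 'less')):
--     return isSafeReportRecursive(report[1:], 'less')
--
--   elif(report[0] < report[1] and action == 'greater'):
--     return False
--
--   elif(report[0] > report[1] and (not action or action == 'greater')):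
--     return isSafeReportRecursive(report[1:], 'greater')
--
--   elif(report[0] > report[1] and action == 'less'):
--     return False
-- ===== SOURCE B (Python) =====
-- def isSafeReportRecursive(report, action = ''):
--   # single linear scan over adjacent pairs, tracking required direction
--   inc = (action == 'less') if action else None  # True = increasing required
--   for a, b in zip(report, report[1:]):
--     d = b - a
--     if not (1 <= abs(d) <= 3):
--       return False
--     if inc is None:
--       inc = d > 0
--     elif (d > 0) != inc:
--       return False
--   return True
-- ===== Notes on version B (the rewrite author's own statement) =====
-- stated objective: alternative
-- what changed: Replaced the tail recursion that re-slices the list with report[1:] at every step by a single iterative scan over zip(report, report[1:]) that tracks the required direction in a flag.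
-- outside the precondition, e.g. on isSafeReportRecursive([0, 1], 'ab'): A returns None, B returns False; on isSafeReportRecursive([], ''): A raises IndexError, B returns True
import Mathlib
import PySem

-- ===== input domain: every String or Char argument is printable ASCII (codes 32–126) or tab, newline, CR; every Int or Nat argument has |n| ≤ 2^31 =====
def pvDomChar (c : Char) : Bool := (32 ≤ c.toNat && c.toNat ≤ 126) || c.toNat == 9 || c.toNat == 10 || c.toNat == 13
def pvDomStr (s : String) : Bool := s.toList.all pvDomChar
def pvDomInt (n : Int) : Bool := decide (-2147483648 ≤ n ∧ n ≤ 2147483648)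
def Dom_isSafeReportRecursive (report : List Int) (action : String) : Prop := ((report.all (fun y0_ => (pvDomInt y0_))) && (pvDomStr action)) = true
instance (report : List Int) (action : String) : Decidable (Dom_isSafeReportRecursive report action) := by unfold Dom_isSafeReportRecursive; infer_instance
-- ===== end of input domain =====

-- B replaces A's list-slicing tail recursion by a single iterative scan over adjacent pairs with a direction flag.

-- ===== PORT A =====
def isValidDifference (a b : Int) : Bool := decide (0 < |a - b|) && decide (|a - b| ≤ 3)

def isSafeReportRecursive (report : List Int) (action : String) : Bool :=
  match report with
  | [] => false            -- Python raises IndexError here (excluded by Pre_)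
  | [_] => true
  | a :: b :: rest =>
    if ¬ isValidDifference a b then false
    else if a < b && (action == "" || action == "less") then
      isSafeReportRecursive (b :: rest) "less"
    else if a < b && action == "greater" then false
    else if a > b && (action == "" || action == "greater") then
      isSafeReportRecursive (b :: rest) "greater"
    else if a > b && action == "less" then false
    else false             -- Python falls off and returns None here (excluded by Pre_)

-- ===== PORT B =====
def altGo : Option Bool → List (Int × Int) → Bool
  | _, [] => true
  | inc, (a, b) :: rest =>
    let d := b - a
    if ¬ (1 ≤ |d| ∧ |d| ≤ 3) then false
    else match inc with
      | none => altGo (some (decide (d > 0))) rest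
      | some i => if decide (d > 0) ≠ i then false else altGo (some i) rest

def isSafeReportRecursive_alt (report : List Int) (action : String) : Bool :=
  let inc : Option Bool := if action ≠ "" then some (action == "less") else none
  altGo inc (report.zip report.tail)

-- ===== PRECONDITION & SPEC =====
-- Pre_ excludes exactly the inputs on which Python A does not return a bool: the empty
-- report (IndexError) and an unrecognised action on a report of length ≥ 2 whose first
-- adjacent difference is valid (there A falls through every branch and returns None).
def Pre_isSafeReportRecursive (report : List Int) (action : String) : Prop :=
  report ≠ [] ∧ (action = "" ∨ action = "less" ∨ action = "greater" ∨
    report.length = 1 ∨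
    ¬ (0 < |report.getD 0 0 - report.getD 1 0| ∧ |report.getD 0 0 - report.getD 1 0| ≤ 3))
instance (report : List Int) (action : String) : Decidable (Pre_isSafeReportRecursive report action) := by
  unfold Pre_isSafeReportRecursive; infer_instance

def pvWitness_isSafeReportRecursive : List Int × String := ([1, 3, 4], "")


def Spec_isSafeReportRecursive (report : List Int) (action : String) (out : Bool) : Prop := out = isSafeReportRecursive_alt report action
instance (report : List Int) (action : String) (out : Bool) : Decidable (Spec_isSafeReportRecursive report action out) := by unfold Spec_isSafeReportRecursive; infer_instance

-- ===== CLAIM (what is proved, stated in full; the proofs are below) =====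
def Claim_equal_isSafeReportRecursive : Prop := ∀ (report : List Int) (action : String), Dom_isSafeReportRecursive report action → Pre_isSafeReportRecursive report action → Spec_isSafeReportRecursive report action (isSafeReportRecursive report action)

-- ===== LEMMAS AND PROOFS =====

-- Core correspondence: A's recursion with a known action equals B's scan with the matching flag.
lemma key (rest : List Int) : ∀ (a : Int) (action : String) (inc : Option Bool),
    (action = "" ∧ inc = none) ∨ (action = "less" ∧ inc = some true) ∨
      (action = "greater" ∧ inc = some false) →
    isSafeReportRecursive (a :: rest) action = altGo inc ((a :: rest).zip rest) := by
  induction rest with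
  | nil =>
    intro a action inc h
    rcases h with ⟨ha, hi⟩ | ⟨ha, hi⟩ | ⟨ha, hi⟩ <;> subst ha <;> subst hi <;> rfl
  | cons b rest ih =>
    intro a action inc h
    have hzip : (a :: b :: rest).zip (b :: rest) = (a, b) :: ((b :: rest).zip rest) := rfl
    rw [hzip]
    by_cases hv : (0 < |a - b| ∧ |a - b| ≤ 3)
    · have hvd : isValidDifference a b = true := by
        unfold isValidDifference
        rw [decide_eq_true hv.1, decide_eq_true hv.2]; rfl
      have hd : (1 ≤ |b - a| ∧ |b - a| ≤ 3) := by rw [abs_sub_comm]; omega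
      rcases lt_trichotomy a b with hlt | heq | hgt
      · have hngt : ¬ a > b := by omega
        have hdpos : decide (b - a > 0) = true := decide_eq_true (by omega)
        rcases h with ⟨ha, hi⟩ | ⟨ha, hi⟩ | ⟨ha, hi⟩ <;> subst ha <;> subst hi
        · simp [isSafeReportRecursive, altGo, hvd, hd, hlt,
            ih b "less" (some true) (Or.inr (Or.inl ⟨rfl, rfl⟩))]
        · simp [isSafeReportRecursive, altGo, hvd, hd, hlt,
            ih b "less" (some true) (Or.inr (Or.inl ⟨rfl, rfl⟩))]
        · simp [isSafeReportRecursive, altGo, hvd, hd, hlt]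
      · exfalso; subst heq; simp at hv
      · have hnlt : ¬ a < b := by omega
        have hdneg : decide (b - a > 0) = false := decide_eq_false (by omega)
        rcases h with ⟨ha, hi⟩ | ⟨ha, hi⟩ | ⟨ha, hi⟩ <;> subst ha <;> subst hi
        · simp [isSafeReportRecursive, altGo, hvd, hd, hgt, hnlt,
            ih b "greater" (some false) (Or.inr (Or.inr ⟨rfl, rfl⟩))]
        · simp [isSafeReportRecursive, altGo, hvd, hd, hgt, hnlt]
        · simp [isSafeReportRecursive, altGo, hvd, hd, hgt, hnlt,
            ih b "greater" (some false) (Or.inr (Or.inr ⟨rfl, rfl⟩))]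
    · have hvd : isValidDifference a b = false := by
        unfold isValidDifference
        rcases Decidable.em (0 < |a - b|) with h1 | h1
        · have h2 : ¬ (|a - b| ≤ 3) := fun h2 => hv ⟨h1, h2⟩
          rw [decide_eq_false h2]; simp
        · rw [decide_eq_false h1]; simp
      have hd : ¬ (1 ≤ |b - a| ∧ |b - a| ≤ 3) := by rw [abs_sub_comm]; omega
      simp [isSafeReportRecursive, altGo, hvd, hd]

-- ===== VERDICT (by name: the statement is the Claim_ definition above) =====
theorem isSafeReportRecursive_spec : Claim_equal_isSafeReportRecursive := by
  intro report action _ hpre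
  unfold Spec_isSafeReportRecursive
  obtain ⟨hne, hact⟩ := hpre
  match report with
  | [] => exact absurd rfl hne
  | [x] =>
    rcases eq_or_ne action "" with h | h <;>
      simp [isSafeReportRecursive, isSafeReportRecursive_alt, altGo, h]
  | a :: b :: rest =>
    rcases hact with h | h | h | h | h
    · subst h
      rw [key (b :: rest) a "" none (Or.inl ⟨rfl, rfl⟩)]
      rfl
    · subst h
      rw [key (b :: rest) a "less" (some true) (Or.inr (Or.inl ⟨rfl, rfl⟩))]
      rfl
    · subst h
      rw [key (b :: rest) a "greater" (some false) (Or.inr (Or.inr ⟨rfl, rfl⟩))]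
      rfl
    · simp at h
    · -- invalid first difference: both sides return false immediately
      simp only [List.getD] at h
      have hv : ¬ (0 < |a - b| ∧ |a - b| ≤ 3) := by simpa using h
      have hvd : isValidDifference a b = false := by
        unfold isValidDifference
        rcases Decidable.em (0 < |a - b|) with h1 | h1
        · have h2 : ¬ (|a - b| ≤ 3) := fun h2 => hv ⟨h1, h2⟩
          rw [decide_eq_false h2]; simp
        · rw [decide_eq_false h1]; simp
      have hd : ¬ (1 ≤ |b - a| ∧ |b - a| ≤ 3) := by rw [abs_sub_comm]; omega
      simp [isSafeReportRecursive, isSafeReportRecursive_alt, altGo, hvd, hd]
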